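-- pv_equiv track=rewrite | github.com/dev-jlpt18/GLC-Interpreter | gcl.py | create_numbers
-- ===== SOURCE A (Python) =====
-- def create_numbers(s):
--     numbers = ""
--     if s > 9:
--         pila = separar_numero(s)
--         numbers = concat_numbers(pila)
--     elif s < 0:
--         numbers += "c_{63}"
--         s = s*(-1)
--         numbers += "("+create_numbers(s)+")"
--     else:
--         numbers = get_number(s)
--     return numbers
--
-- def concat_numbers(p):
--     concat = ""
--     range = len(p)-1
--     if (range != 0):
--         concat += "c_{54}"
--         n = p.pop()
--         id = get_number(n)
--         concat += "("+concat_numbers(p)+")"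
--         concat += id
--         return concat
--     else:
--         n = p.pop(0)
--         id = get_number(n)
--         concat += id
--         return concat
--
-- def get_number(s):
--     numbers = ""
--     if s == 0:
--         numbers = "c_{42}"
--     elif s == 1:
--         numbers = "c_{43}"
--     elif s == 2:
--         numbers = "c_{44}"
--     elif s == 3:
--         numbers = "c_{45}"
--     elif s == 4:
--        numbers =  "c_{46}"
--     elif s == 5:
--         numbers = "c_{47}"
--     elif s == 6:
--         numbers = "c_{48}"
--     elif s == 7:
--         numbers = "c_{49}"
--     elif s == 8:
--         numbers = "c_{50}"
--     else:
--         numbers = "c_{51}"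
--     return numbers
--
-- def separar_numero(numero):
--     # Convertir el número a string para iterar sobre cada dígito
--     numero_str = str(numero)
--     # Convertir cada dígito de vuelta a entero y almacenar en una lista
--     digitos = [int(digito) for digito in numero_str]
--     return digitos
-- ===== SOURCE B (Python) =====
-- _TABLE = ["c_{42}", "c_{43}", "c_{44}", "c_{45}", "c_{46}",
--           "c_{47}", "c_{48}", "c_{49}", "c_{50}", "c_{51}"]
--
--
-- def create_numbers(s):
--     if s < 0:
--         return "c_{63}(" + create_numbers(-s) + ")"
--     if s <= 9:
--         return _TABLE[s]
--     digits = [int(ch) for ch in str(s)]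
--     res = _TABLE[digits[0]]
--     for d in digits[1:]:
--         res = "c_{54}(" + res + ")" + _TABLE[d]
--     return res
-- ===== Notes on version B (the rewrite author's own statement) =====
-- stated objective: simpler
-- what changed: Replaces the mutually recursive create_numbers/concat_numbers pair (which pops digits off the back of a list and rebuilds the string on the way out of the recursion) with a direct table lookup for single digits and one left-to-right fold over the digit list for multi-digit numbers.
import Mathlib
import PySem

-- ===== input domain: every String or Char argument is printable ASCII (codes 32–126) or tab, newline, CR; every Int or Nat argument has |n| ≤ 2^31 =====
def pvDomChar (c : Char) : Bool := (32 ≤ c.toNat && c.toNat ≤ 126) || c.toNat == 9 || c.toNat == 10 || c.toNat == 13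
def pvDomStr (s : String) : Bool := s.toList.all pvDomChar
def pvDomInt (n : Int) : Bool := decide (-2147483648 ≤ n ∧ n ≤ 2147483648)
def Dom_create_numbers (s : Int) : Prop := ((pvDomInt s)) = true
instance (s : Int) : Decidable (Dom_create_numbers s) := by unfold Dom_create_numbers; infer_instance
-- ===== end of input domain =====

-- B replaces the mutually recursive create_numbers/concat_numbers pair by a table lookup
-- plus a single left fold over the digit list (objective: simpler decomposition).

-- ===== PORT A =====
-- get_number: the if/elif chain (everything not 0..8 falls into the final else)
def getNumber (s : Int) : String :=
  if s = 0 then "c_{42}"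
  else if s = 1 then "c_{43}"
  else if s = 2 then "c_{44}"
  else if s = 3 then "c_{45}"
  else if s = 4 then "c_{46}"
  else if s = 5 then "c_{47}"
  else if s = 6 then "c_{48}"
  else if s = 7 then "c_{49}"
  else if s = 8 then "c_{50}"
  else "c_{51}"

-- separar_numero: [int(d) for d in str(numero)].  int(d) is PySem.Int.ofStr?; the
-- .getD 0 default is unreachable here (str of an int has only digit chars when the
-- int is positive, which is the only way A calls it).
def separarNumero (numero : Int) : List Int :=
  (PySem.Int.toStr numero).toList.map (fun d => (PySem.Int.ofStr? (String.mk [d])).getD 0)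

-- concat_numbers: p.pop() is the last element, p.pop(0) the first; pops on an empty
-- list never happen on A's call sites (digit lists are nonempty); [] ↦ "" is a dead branch.
def concatNumbers (p : List Int) : String :=
  if p.length - 1 ≠ 0 then
    "c_{54}" ++ ("(" ++ concatNumbers p.dropLast ++ ")") ++ getNumber (p.getLast?.getD 0)
  else
    getNumber (p.headD 0)
termination_by p.length
decreasing_by simp only [List.length_dropLast]; omega

def create_numbers (s : Int) : String :=
  if s > 9 then concatNumbers (separarNumero s)
  else if s < 0 then "c_{63}" ++ ("(" ++ create_numbers (-s) ++ ")")
  else getNumber s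
termination_by (if s < 0 then 1 else 0 : Nat)
decreasing_by split_ifs <;> omega

-- ===== PORT B =====
def pvTable : List String :=
  ["c_{42}", "c_{43}", "c_{44}", "c_{45}", "c_{46}",
   "c_{47}", "c_{48}", "c_{49}", "c_{50}", "c_{51}"]

-- _TABLE[d]; every index used is in [0, 9], so the .getD "" default is unreachable
def pvLook (d : Int) : String := (PySem.List.pyGet? pvTable d).getD ""

-- [int(ch) for ch in str(s)]
def pvDigits (s : Int) : List Int :=
  (PySem.Int.toStr s).toList.map (fun ch => (PySem.Int.ofStr? (String.mk [ch])).getD 0)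

def create_numbers_alt (s : Int) : String :=
  if s < 0 then "c_{63}(" ++ create_numbers_alt (-s) ++ ")"
  else if s ≤ 9 then pvLook s
  else
    match pvDigits s with
    | [] => ""          -- unreachable: str(s) is never empty
    | d :: ds => ds.foldl (fun res x => "c_{54}(" ++ res ++ ")" ++ pvLook x) (pvLook d)
termination_by (if s < 0 then 1 else 0 : Nat)
decreasing_by split_ifs <;> omega

-- ===== PRECONDITION & SPEC =====
def Spec_create_numbers (s : Int) (out : String) : Prop := out = create_numbers_alt s
instance (s : Int) (out : String) : Decidable (Spec_create_numbers s out) := by unfold Spec_create_numbers; infer_instance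

-- ===== CLAIM (what is proved, stated in full; the proofs are below) =====
def Claim_equal_create_numbers : Prop := ∀ (s : Int), Dom_create_numbers s → Spec_create_numbers s (create_numbers s)

-- ===== LEMMAS AND PROOFS =====

def pvDigitChars : List Char := ['0','1','2','3','4','5','6','7','8','9']

theorem digitChar_mem (m : Nat) (h : m < 10) : Nat.digitChar m ∈ pvDigitChars := by
  interval_cases m <;> decide

theorem toDigitsCore_mem (fuel : Nat) : ∀ (n : Nat) (ds : List Char),
    (∀ c ∈ ds, c ∈ pvDigitChars) → ∀ c ∈ Nat.toDigitsCore 10 fuel n ds, c ∈ pvDigitChars := by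
  induction fuel with
  | zero => intro n ds hds c hc; exact hds c hc
  | succ f ih =>
    intro n ds hds c hc
    rw [Nat.toDigitsCore] at hc
    by_cases hz : n / 10 = 0
    · simp only [hz] at hc
      rcases List.mem_cons.mp hc with h | h
      · exact h ▸ digitChar_mem _ (Nat.mod_lt _ (by omega))
      · exact hds c h
    · simp only [if_neg hz] at hc
      refine ih (n / 10) _ ?_ c hc
      intro c' hc'
      rcases List.mem_cons.mp hc' with h | h
      · exact h ▸ digitChar_mem _ (Nat.mod_lt _ (by omega))
      · exact hds c' h

theorem toDigitsCore_ne_nil (fuel : Nat) : ∀ (n : Nat) (ds : List Char),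
    fuel ≠ 0 ∨ ds ≠ [] → Nat.toDigitsCore 10 fuel n ds ≠ [] := by
  induction fuel with
  | zero => intro n ds h; rw [Nat.toDigitsCore]; tauto
  | succ f ih =>
    intro n ds _
    rw [Nat.toDigitsCore]
    by_cases hz : n / 10 = 0
    · simp [hz]
    · rw [if_neg hz]
      exact ih (n / 10) _ (Or.inr (List.cons_ne_nil _ _))

theorem conv_range (c : Char) (hc : c ∈ pvDigitChars) :
    0 ≤ (PySem.Int.ofStr? (String.mk [c])).getD 0 ∧
      (PySem.Int.ofStr? (String.mk [c])).getD 0 ≤ 9 := by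
  fin_cases hc <;> decide

theorem chars_range (s : Int) (hs : s > 9) :
    ∀ c ∈ (PySem.Int.toStr s).toList, c ∈ pvDigitChars := by
  rw [PySem.Int.toList_toStr]
  have hneg : ¬ s < 0 := by omega
  simp only [PySem.Int.toChars, if_neg hneg]
  exact toDigitsCore_mem _ _ [] (by simp)

theorem digits_range (s : Int) (hs : s > 9) :
    ∀ d ∈ separarNumero s, 0 ≤ d ∧ d ≤ 9 := by
  unfold separarNumero
  intro d hd
  obtain ⟨c, hc, rfl⟩ := List.mem_map.mp hd
  exact conv_range c (chars_range s hs c hc)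

theorem digits_ne_nil (s : Int) (hs : s > 9) : separarNumero s ≠ [] := by
  unfold separarNumero
  rw [PySem.Int.toList_toStr]
  have hneg : ¬ s < 0 := by omega
  simp only [PySem.Int.toChars, if_neg hneg, ne_eq, List.map_eq_nil_iff]
  exact toDigitsCore_ne_nil _ _ [] (Or.inl (by omega))

theorem look_eq_get (d : Int) (h0 : 0 ≤ d) (h9 : d ≤ 9) : pvLook d = getNumber d := by
  interval_cases d <;> rfl

theorem concat_eq_fold (d : Int) (ds : List Int)
    (h : ∀ x ∈ d :: ds, 0 ≤ x ∧ x ≤ 9) :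
    concatNumbers (d :: ds) =
      ds.foldl (fun res x => "c_{54}(" ++ res ++ ")" ++ pvLook x) (pvLook d) := by
  induction ds using List.reverseRecOn with
  | nil =>
    rw [concatNumbers.eq_def]
    simp only [List.length_cons, List.length_nil, List.foldl_nil, List.headD_cons]
    rw [if_neg (by omega), look_eq_get d (h d List.mem_cons_self).1 (h d List.mem_cons_self).2]
  | append_singleton es x ih =>
    rw [concatNumbers.eq_def]
    have hlen : (d :: (es ++ [x])).length - 1 ≠ 0 := by simp
    rw [if_pos hlen]
    have hdrop : (d :: (es ++ [x])).dropLast = d :: es := by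
      rw [show d :: (es ++ [x]) = (d :: es) ++ [x] by simp, List.dropLast_concat]
    have hlast : (d :: (es ++ [x])).getLast?.getD 0 = x := by
      rw [show d :: (es ++ [x]) = (d :: es) ++ [x] by simp, List.getLast?_concat]; rfl
    have hsub : ∀ y ∈ d :: es, 0 ≤ y ∧ y ≤ 9 := by
      intro y hy
      refine h y ?_
      rcases List.mem_cons.mp hy with h1 | h1
      · exact h1 ▸ List.mem_cons_self
      · exact List.mem_cons_of_mem _ (by simp [h1])
    rw [hdrop, hlast, List.foldl_append, List.foldl_cons, List.foldl_nil, ih hsub,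
      look_eq_get x (h x (by simp)).1 (h x (by simp)).2]
    rfl

theorem main_nonneg (s : Int) (h0 : 0 ≤ s) : create_numbers s = create_numbers_alt s := by
  rw [create_numbers.eq_def, create_numbers_alt.eq_def]
  by_cases h9 : s > 9
  · rw [if_pos h9, if_neg (by omega : ¬ s < 0), if_neg (by omega : ¬ s ≤ 9)]
    obtain ⟨d, ds, hd⟩ := List.exists_cons_of_ne_nil (digits_ne_nil s h9)
    have hd' : pvDigits s = d :: ds := hd
    rw [hd, hd']
    exact concat_eq_fold d ds (hd ▸ digits_range s h9)
  · rw [if_neg h9, if_neg (by omega : ¬ s < 0), if_neg (by omega : ¬ s < 0),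
      if_pos (by omega : s ≤ 9), look_eq_get s h0 (by omega)]

-- ===== VERDICT (by name: the statement is the Claim_ definition above) =====
theorem create_numbers_spec : Claim_equal_create_numbers := by
  intro s _
  unfold Spec_create_numbers
  by_cases h0 : 0 ≤ s
  · exact main_nonneg s h0
  · rw [create_numbers.eq_def, create_numbers_alt.eq_def]
    have h1 : ¬ s > 9 := by omega
    have h2 : s < 0 := by omega
    rw [if_neg h1, if_pos h2, if_pos h2, main_nonneg (-s) (by omega)]
    rfl
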